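-- pv_equiv track=rewrite | github.com/Willian-Girao/crawlers_ | crawler_02/crawler_prod_img.py | getImageNameFromUrl
-- ===== SOURCE A (Python) =====
-- def getImageNameFromUrl(img_url):
--     img_name = []
--     string_img_name = ''
--     range_ = len(img_url)
--     for i in range(0, range_):
--         if img_url[((range_-1)-i)] == '/':
--             break
--         else:
--             img_name = [img_url[((range_-1)-i)]] + img_name
--     for char in img_name:
--         string_img_name += char
--
--     return string_img_name
-- ===== SOURCE B (Python) =====
-- def getImageNameFromUrl(img_url):
--     return img_url.split('/')[-1]
-- ===== Notes on version B (the rewrite author's own statement) =====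
-- stated objective: simpler
-- what changed: Replaces the backward character-by-character scan (quadratic list prepends plus a manual string-concatenation loop) with a single forward split on the separator character, taking the last segment.
import Mathlib
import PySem

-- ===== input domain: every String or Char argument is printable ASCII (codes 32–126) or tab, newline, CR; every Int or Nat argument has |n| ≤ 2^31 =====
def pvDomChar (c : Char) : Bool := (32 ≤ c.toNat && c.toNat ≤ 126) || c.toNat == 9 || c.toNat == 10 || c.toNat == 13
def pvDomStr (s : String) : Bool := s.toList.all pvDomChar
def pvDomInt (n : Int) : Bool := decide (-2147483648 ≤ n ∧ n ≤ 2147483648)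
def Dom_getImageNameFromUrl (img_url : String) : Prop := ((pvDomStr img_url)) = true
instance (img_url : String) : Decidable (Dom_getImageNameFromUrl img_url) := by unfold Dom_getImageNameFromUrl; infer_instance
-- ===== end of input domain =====

-- B replaces A's backward char-by-char scan (list prepends + manual string concatenation)
-- with a single forward split on '/' taking the last segment; objective: simpler.
-- ===== PORT A =====
-- literal transliteration: i counts up, reads img_url[(range_-1)-i], breaks at '/',
-- prepends otherwise; then a second loop concatenates the chars into a string
def pvALoop (cs : List Char) (range_ : Nat) (i : Nat) (img_name : List Char) : List Char :=
  if i < range_ then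
    match PySem.List.pyGet? cs ((range_ : Int) - 1 - i) with
    | some c => if c = '/' then img_name else pvALoop cs range_ (i + 1) (c :: img_name)
    | none => img_name   -- unreachable: the index is always in range
  else img_name
termination_by range_ - i

def getImageNameFromUrl (img_url : String) : String :=
  let cs := img_url.toList
  let range_ := cs.length
  let img_name := pvALoop cs range_ 0 []
  img_name.foldl (fun s c => s ++ String.ofList [c]) ""

-- ===== PORT B =====
-- Source B: return img_url.split('/')[-1]
def getImageNameFromUrl_alt (img_url : String) : String :=
  let parts := PySem.Chars.splitOn img_url.toList ['/']
  match PySem.List.pyGet? parts (-1) with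
  | some r => String.ofList r
  | none => ""   -- unreachable: split never returns an empty list

-- ===== PRECONDITION & SPEC =====
def Spec_getImageNameFromUrl (img_url : String) (out : String) : Prop := out = getImageNameFromUrl_alt img_url
instance (img_url : String) (out : String) : Decidable (Spec_getImageNameFromUrl img_url out) := by unfold Spec_getImageNameFromUrl; infer_instance

-- ===== CLAIM (what is proved, stated in full; the proofs are below) =====
def Claim_equal_getImageNameFromUrl : Prop := ∀ (img_url : String), Dom_getImageNameFromUrl img_url → Spec_getImageNameFromUrl img_url (getImageNameFromUrl img_url)

-- ===== LEMMAS AND PROOFS =====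

-- helper recursions and lemmas used only by the proofs
def pvSplitSlash : List Char → List Char → List (List Char)
  | [], cur => [cur.reverse]
  | c :: rest, cur => if c = '/' then cur.reverse :: pvSplitSlash rest [] else pvSplitSlash rest (c :: cur)

def pvG : List Char → List Char → List Char
  | [], cur => cur.reverse
  | c :: rest, cur => if c = '/' then pvG rest [] else pvG rest (c :: cur)

theorem pvSplitSlash_ne_nil (l cur : List Char) : pvSplitSlash l cur ≠ [] := by
  cases l with
  | nil => simp [pvSplitSlash]
  | cons c rest => simp only [pvSplitSlash]; split <;> simp [pvSplitSlash_ne_nil rest]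

theorem pvGo_eq (fuel : Nat) (l cur : List Char) (acc : List (List Char))
    (h : l.length < fuel) :
    PySem.Chars.splitOn.go ['/'] fuel l cur acc = acc.reverse ++ pvSplitSlash l cur := by
  induction fuel generalizing l cur acc with
  | zero => omega
  | succ fuel ih =>
    cases l with
    | nil => simp [PySem.Chars.splitOn.go, pvSplitSlash]
    | cons c rest =>
      simp only [List.length_cons] at h
      simp only [PySem.Chars.splitOn.go, List.isPrefixOf, Bool.and_true]
      by_cases hc : c = '/'
      · subst hc
        rw [if_pos (by simp)]
        show PySem.Chars.splitOn.go ['/'] fuel rest [] (cur.reverse :: acc)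
          = acc.reverse ++ pvSplitSlash ('/' :: rest) cur
        rw [ih rest [] (cur.reverse :: acc) (by omega)]
        simp [pvSplitSlash]
      · rw [if_neg (by simp only [beq_iff_eq]; exact fun h' => hc h'.symm)]
        rw [ih rest (c :: cur) acc (by omega)]
        simp [pvSplitSlash, hc]

theorem pvLast_split (l cur : List Char) :
    (pvSplitSlash l cur).getLast? = some (pvG l cur) := by
  induction l generalizing cur with
  | nil => simp [pvSplitSlash, pvG]
  | cons c rest ih =>
    by_cases hc : c = '/'
    · subst hc
      rw [pvSplitSlash, if_pos rfl, pvG, if_pos rfl]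
      rcases h : pvSplitSlash rest [] with _ | ⟨x, xs⟩
      · exact absurd h (pvSplitSlash_ne_nil rest [])
      · rw [List.getLast?_cons_cons, ← h, ih]
    · rw [pvSplitSlash, if_neg hc, pvG, if_neg hc, ih]

theorem pvTW_ne (l : List Char) (h : '/' ∈ l) : (l.takeWhile (· != '/')).length ≠ l.length := by
  induction l with
  | nil => simp at h
  | cons c rest ih =>
    by_cases hc : c = '/'
    · subst hc; simp [List.takeWhile_cons]
    · have hr : '/' ∈ rest := by
        rcases List.mem_cons.mp h with h' | h'
        · exact absurd h'.symm hc
        · exact h'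
      simp only [List.takeWhile_cons, List.length_cons]
      rw [if_pos (by simp [hc])]
      simp only [List.length_cons]
      have := ih hr
      omega

theorem pvTW_all (l : List Char) (h : '/' ∉ l) : l.takeWhile (· != '/') = l := by
  apply List.takeWhile_eq_self_iff.mpr
  intro a ha
  simp only [bne_iff_ne, ne_eq]
  intro h'; subst h'; exact h ha

theorem pvG_spec (l cur : List Char) :
    pvG l cur = if '/' ∈ l then ((l.reverse.takeWhile (· != '/')).reverse)
                else cur.reverse ++ l := by
  induction l generalizing cur with
  | nil => simp [pvG]
  | cons c rest ih =>
    by_cases hc : c = '/'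
    · subst hc
      rw [pvG, if_pos rfl, ih, if_pos List.mem_cons_self]
      by_cases hr : '/' ∈ rest
      · rw [if_pos hr]
        have hne : (rest.reverse.takeWhile (· != '/')).length ≠ rest.reverse.length :=
          pvTW_ne rest.reverse (by simpa using hr)
        rw [List.reverse_cons, List.takeWhile_append, if_neg hne]
      · rw [if_neg hr]
        have hall := pvTW_all rest.reverse (by simpa using hr)
        rw [List.reverse_cons, List.takeWhile_append, hall]
        simp
    · have hmem : ('/' ∈ c :: rest) ↔ ('/' ∈ rest) := by
        constructor
        · intro h'
          rcases List.mem_cons.mp h' with h'' | h''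
          · exact absurd h''.symm hc
          · exact h''
        · exact fun h' => List.mem_cons_of_mem c h'
      rw [pvG, if_neg hc, ih]
      by_cases hr : '/' ∈ rest
      · rw [if_pos hr, if_pos (hmem.mpr hr)]
        have hne : (rest.reverse.takeWhile (· != '/')).length ≠ rest.reverse.length :=
          pvTW_ne rest.reverse (by simpa using hr)
        rw [List.reverse_cons, List.takeWhile_append, if_neg hne]
      · rw [if_neg hr, if_neg (fun h => hr (hmem.mp h))]
        simp

theorem pvALoop_spec (cs : List Char) (i : Nat) (acc : List Char) (h : i ≤ cs.length) :
    pvALoop cs cs.length i acc = ((cs.reverse.drop i).takeWhile (· != '/')).reverse ++ acc := by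
  rcases Nat.lt_or_ge i cs.length with hi | hi
  · rw [pvALoop, if_pos hi]
    have hidx : ((cs.length : Int) - 1 - i) = ((cs.length - 1 - i : Nat) : Int) := by omega
    have hlt : cs.length - 1 - i < cs.length := by omega
    rw [hidx, PySem.List.pyGet?_natCast, List.getElem?_eq_getElem hlt]
    have hi' : i < cs.reverse.length := by simpa using hi
    have hrev : cs.reverse.drop i = cs[cs.length - 1 - i] :: cs.reverse.drop (i + 1) := by
      rw [← List.getElem_cons_drop hi', List.getElem_reverse]
    rw [hrev]
    by_cases hc : cs[cs.length - 1 - i] = '/'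
    · simp [hc, List.takeWhile_cons]
    · simp only [if_neg hc]
      rw [pvALoop_spec cs (i + 1) (cs[cs.length - 1 - i] :: acc) (by omega)]
      simp only [List.takeWhile_cons]
      rw [if_pos (by simp [hc])]
      simp
  · have hie : i = cs.length := by omega
    rw [pvALoop, if_neg (by omega)]
    rw [hie, List.drop_eq_nil_of_le (by simp)]
    simp
termination_by cs.length - i

theorem pvFoldl_push (l : List Char) (a : List Char) :
    l.foldl (fun s c => s ++ String.ofList [c]) (String.ofList a) = String.ofList (a ++ l) := by
  induction l generalizing a with
  | nil => simp
  | cons c rest ih =>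
    simp only [List.foldl_cons]
    have : String.ofList a ++ String.ofList [c] = String.ofList (a ++ [c]) := by
      apply String.ext; simp
    rw [this, ih]
    simp

theorem pvB_chars (cs : List Char) :
    getImageNameFromUrl_alt (String.ofList cs)
      = String.ofList ((cs.reverse.takeWhile (· != '/')).reverse) := by
  unfold getImageNameFromUrl_alt
  simp only [PySem.Chars.splitOn, String.toList_ofList]
  rw [pvGo_eq (cs.length + 1) cs [] [] (by omega), List.reverse_nil, List.nil_append]
  have hne := pvSplitSlash_ne_nil cs []
  have hget : PySem.List.pyGet? (pvSplitSlash cs []) (-1) = some (pvG cs []) := by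
    rw [← pvLast_split cs []]
    rcases h : pvSplitSlash cs [] with _ | ⟨x, xs⟩
    · exact absurd h hne
    · simp [PySem.List.pyGet?, PySem.List.pyIdx?, List.getLast?_eq_getElem?]
  rw [hget]
  have hg : pvG cs [] = (cs.reverse.takeWhile (· != '/')).reverse := by
    rw [pvG_spec]
    by_cases h : '/' ∈ cs
    · rw [if_pos h]
    · rw [if_neg h]
      have := pvTW_all cs.reverse (by simpa using h)
      simp [this]
  rw [hg]

-- ===== VERDICT (by name: the statement is the Claim_ definition above) =====
theorem getImageNameFromUrl_spec : Claim_equal_getImageNameFromUrl := by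
  intro img_url _
  unfold Spec_getImageNameFromUrl
  show (pvALoop img_url.toList img_url.toList.length 0 []).foldl
      (fun s c => s ++ String.ofList [c]) "" = getImageNameFromUrl_alt img_url
  rw [pvALoop_spec img_url.toList 0 [] (by omega), List.drop_zero, List.append_nil]
  rw [show ("" : String) = String.ofList [] from rfl, pvFoldl_push, List.nil_append]
  conv_rhs => rw [show img_url = String.ofList img_url.toList from String.ofList_toList.symm]
  rw [pvB_chars]
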